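-- pv_equiv track=rewrite | github.com/pypi-data/pypi-mirror-310 | packages/xython/xython-3.2.1-py3-none-any.whl/xython/youtil.py | find_more_elements
-- ===== SOURCE A (Python) =====
-- from collections import Counter
--
-- def find_more_elements(list1, list2):
-- 	"""
-- 	두개의 리스트에서, 작은것을 기준으로 큰것중에 어느부분이 더 있고, 위치는 어디인지를 알려주는 것
-- 	이것의 사용목적은 워드에서 영역안의 글자를 읽어오는데, 3가지의 경우가 잇어서, 어떤것이 어떤 부분이 다른것들과 차이가 나는지를
-- 	확인하기위해서 만든것이다
--
-- 	:param list1: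
-- 	:param list2:
-- 	:return:
-- 	"""
--
-- 	counter1 = Counter(list1)
-- 	counter2 = Counter(list2)
-- 	if len(counter1) < len(counter2):
-- 		smaller_counter = counter1
-- 		larger_counter = counter2
-- 		smaller_list = list1
-- 		larger_list = list2
-- 	else:
-- 		smaller_counter = counter2
-- 		larger_counter = counter1
-- 		smaller_list = list2
-- 		larger_list = list1
-- 	more_elements = []
-- 	for element in larger_counter:
-- 		if element not in smaller_counter or larger_counter[element] > smaller_counter[element]:
-- 			more_elements.append(element)
-- 	result=[]
-- 	for element in more_elements:
-- 		positions = [i for i, x in enumerate(larger_list) if x == element]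
-- 		result.append((element, positions))
-- 	return result
-- ===== SOURCE B (Python) =====
-- from collections import Counter
-- from collections import defaultdict
--
-- def find_more_elements(list1, list2):
--     if len(set(list1)) < len(set(list2)):
--         smaller_list, larger_list = list1, list2
--     else:
--         smaller_list, larger_list = list2, list1
--     smaller_counter = Counter(smaller_list)
--     positions = defaultdict(list)
--     for i, x in enumerate(larger_list):
--         positions[x].append(i)
--     return [(e, pos) for e, pos in positions.items() if len(pos) > smaller_counter[e]]
-- ===== Notes on version B (the rewrite author's own statement) =====
-- stated objective: faster
-- what changed: B drops the larger list's Counter and the separate more_elements pass: one enumerate pass builds an element->positions index of the larger list, whose entry lengths replace the larger Counter and whose entries are emitted directly when longer than the smaller Counter's count.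
import Mathlib
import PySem

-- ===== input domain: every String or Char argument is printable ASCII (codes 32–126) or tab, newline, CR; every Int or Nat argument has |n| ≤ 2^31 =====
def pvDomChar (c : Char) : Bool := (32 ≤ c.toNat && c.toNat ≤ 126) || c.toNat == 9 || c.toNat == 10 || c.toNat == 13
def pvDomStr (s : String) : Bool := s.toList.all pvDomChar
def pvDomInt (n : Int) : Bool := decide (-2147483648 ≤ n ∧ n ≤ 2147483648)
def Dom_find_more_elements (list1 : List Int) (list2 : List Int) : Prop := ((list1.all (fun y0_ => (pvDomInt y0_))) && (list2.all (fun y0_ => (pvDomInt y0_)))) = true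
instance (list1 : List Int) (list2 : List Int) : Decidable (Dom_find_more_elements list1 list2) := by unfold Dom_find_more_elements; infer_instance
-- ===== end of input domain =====

-- B keeps only the smaller list's Counter and builds one element→positions index of the larger
-- list in a single pass, instead of A's second Counter plus a per-element rescan (objective: faster).


-- ===== PORT A =====
def find_more_elements (list1 : List Int) (list2 : List Int) : List (Int × List Int) :=
  let counter1 := PySem.Dict.counter list1
  let counter2 := PySem.Dict.counter list2
  let picked :=
    if counter1.size < counter2.size then (counter1, counter2, list1, list2)
    else (counter2, counter1, list2, list1)
  let smaller_counter := picked.1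
  let larger_counter := picked.2.1
  let larger_list := picked.2.2.2
  let more_elements := larger_counter.keys.foldl
    (fun acc element =>
      if !(smaller_counter.contains element)
         || smaller_counter.getD element 0 < larger_counter.getD element 0
      then acc ++ [element] else acc) []
  more_elements.foldl
    (fun result element =>
      result ++ [(element,
        ((PySem.List.enumerate larger_list).filter (fun p => p.2 == element)).map (fun p => p.1))]) []

-- ===== PORT B =====
def find_more_elements_alt (list1 : List Int) (list2 : List Int) : List (Int × List Int) :=
  let picked :=
    if (PySem.Set.ofList list1).length < (PySem.Set.ofList list2).length
    then (list1, list2) else (list2, list1)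
  let smaller_counter := PySem.Dict.counter picked.1
  let positions := (PySem.List.enumerate picked.2).foldl
    (fun d p => d.modify p.2 [] (fun l => l ++ [p.1])) PySem.Dict.empty
  positions.items.filter (fun ep => smaller_counter.getD ep.1 0 < (ep.2.length : Int))

-- ===== PRECONDITION & SPEC =====
def Spec_find_more_elements (list1 : List Int) (list2 : List Int) (out : List (Int × List Int)) : Prop := out = find_more_elements_alt list1 list2
instance (list1 : List Int) (list2 : List Int) (out : List (Int × List Int)) : Decidable (Spec_find_more_elements list1 list2 out) := by unfold Spec_find_more_elements; infer_instance

-- ===== CLAIM (what is proved, stated in full; the proofs are below) =====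
def Claim_equal_find_more_elements : Prop := ∀ (list1 : List Int) (list2 : List Int), Dom_find_more_elements list1 list2 → Spec_find_more_elements list1 list2 (find_more_elements list1 list2)

-- ===== LEMMAS AND PROOFS =====

-- number of distinct keys of Counter(xs) = length of set(xs)
theorem size_counter (xs : List Int) :
    (PySem.Dict.counter xs).size = (PySem.Set.ofList xs).length := by
  simp [PySem.Dict.size, PySem.Dict.items_counter xs]

-- length of the position list of e in ll = count of e in ll
theorem length_filter_enumerate (ll : List Int) (e : Int) : ∀ s : Int,
    (((PySem.List.enumerate ll s).filter (fun p => p.2 == e)).map (fun p => p.1)).length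
      = ll.count e := by
  induction ll with
  | nil => intro s; simp [PySem.List.enumerate_nil]
  | cons x xs ih =>
    intro s
    by_cases hx : x = e <;>
      simp [PySem.List.enumerate_cons, hx, ih (s + 1)]

-- both bodies, specialised to an already-picked (smaller, larger) pair, agree
theorem core_eq (sl ll : List Int) :
    ((PySem.Dict.counter ll).keys.foldl
      (fun acc element =>
        if !((PySem.Dict.counter sl).contains element)
           || (PySem.Dict.counter sl).getD element 0 < (PySem.Dict.counter ll).getD element 0
        then acc ++ [element] else acc) []).foldl
      (fun result element =>
        result ++ [(element,
          ((PySem.List.enumerate ll).filter (fun p => p.2 == element)).map (fun p => p.1))]) []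
    = ((PySem.List.enumerate ll).foldl
        (fun d p => d.modify p.2 [] (fun l => l ++ [p.1])) PySem.Dict.empty).items.filter
        (fun ep => (PySem.Dict.counter sl).getD ep.1 0 < (ep.2.length : Int)) := by
  -- positions dict on the B side
  set posA : Int → List Int :=
    fun e => ((PySem.List.enumerate ll).filter (fun p => p.2 == e)).map (fun p => p.1) with hposA
  have hkeys : ((PySem.List.enumerate ll).foldl
      (fun d p => d.modify p.2 [] (fun l => l ++ [p.1])) PySem.Dict.empty).keys
      = PySem.Set.ofList ll := by
    have := PySem.Dict.keys_foldl_modify_key (PySem.List.enumerate ll)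
      (fun p => p.2) ([] : List Int) (fun _ p => fun l => l ++ [p.1]) PySem.Dict.empty
    simpa [PySem.List.map_snd_enumerate, PySem.Set.update, PySem.Set.ofList_eq_foldl,
      PySem.Dict.empty] using this
  have hnd : ((PySem.List.enumerate ll).foldl
      (fun d p => d.modify p.2 [] (fun l => l ++ [p.1])) PySem.Dict.empty).keys.Nodup := by
    exact PySem.Dict.nodup_keys_foldl_modify_key (PySem.List.enumerate ll)
      (fun p => p.2) ([] : List Int) (fun _ p => fun l => l ++ [p.1]) PySem.Dict.empty (by simp [PySem.Dict.empty])
  have hgetD : ∀ e, ((PySem.List.enumerate ll).foldl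
      (fun d p => d.modify p.2 [] (fun l => l ++ [p.1])) PySem.Dict.empty).getD e []
      = posA e := by
    intro e
    have hmap : (PySem.List.enumerate ll).foldl
        (fun d p => d.modify p.2 [] (fun l => l ++ [p.1])) PySem.Dict.empty
        = ((PySem.List.enumerate ll).map (fun p => (p.2, p.1))).foldl
          (fun d q => d.modify q.1 [] (fun l => l ++ [q.2])) PySem.Dict.empty := by
      rw [List.foldl_map]
    rw [hmap, PySem.Dict.getD_foldl_modify_append]
    simp [hposA, List.filter_map, List.map_map, Function.comp_def]
  have hitems : ((PySem.List.enumerate ll).foldl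
      (fun d p => d.modify p.2 [] (fun l => l ++ [p.1])) PySem.Dict.empty).items
      = (PySem.Set.ofList ll).map (fun k => (k, posA k)) := by
    rw [PySem.Dict.items_eq_map_keys _ hnd []]
    rw [hkeys]
    exact List.map_congr_left (fun k _ => by rw [hgetD k])
  -- A side: fold→filter, fold→map
  rw [PySem.Dict.keys_counter, PySem.List.foldl_append_if_eq_filter,
    PySem.List.foldl_append_singleton_eq_map, hitems, List.filter_map]
  simp only [List.nil_append, Function.comp_def]
  congr 1
  apply List.filter_congr
  intro e he
  have hemem : e ∈ ll := by
    exact (PySem.Set.mem_ofList ll e).1 he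
  have hlen : (posA e).length = ll.count e := length_filter_enumerate ll e 0
  rw [PySem.Dict.getD_counter, PySem.Dict.getD_counter, PySem.Dict.contains_counter]
  by_cases hc : sl.contains e
  · simp only [List.contains_eq_mem, decide_eq_true_eq] at hc
    simp [List.contains_eq_mem, hc, hlen]
  · have h0 : sl.count e = 0 := by
      simp only [List.contains_eq_mem, decide_eq_true_eq] at hc
      simp [List.count_eq_zero, hc]
    have hpos : 0 < ll.count e := List.count_pos_iff.mpr hemem
    simp only [hc, Bool.not_false, Bool.true_or, h0, hlen]
    simpa using (by exact_mod_cast hpos : (0 : Int) < (ll.count e : Int))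

-- ===== VERDICT (by name: the statement is the Claim_ definition above) =====
theorem find_more_elements_spec : Claim_equal_find_more_elements := by
  intro list1 list2 _
  show find_more_elements list1 list2 = find_more_elements_alt list1 list2
  unfold find_more_elements find_more_elements_alt
  simp only [size_counter]
  by_cases h : (PySem.Set.ofList list1).length < (PySem.Set.ofList list2).length
  · simp only [h, if_pos]
    exact core_eq list1 list2
  · simp only [h, if_false]
    exact core_eq list2 list1
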